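-- pv_equiv track=rewrite | github.com/ngoolglory/Algorithm | SSAFY/list2/boongeobbang.py | boongeobbang
-- ===== SOURCE A (Python) =====
-- def boongeobbang(N, M, K, arrive_time):
--     arrive_time.sort()      # 손님 오는 시각 오름차순 정렬
--     cur_sec = M             # 현재 시각 (초기값은 한번 구운 상태)
--     cur_num = K             # 현재 남아 있는 붕어빵 개수 (초기값은 한번 구운 상태)
--     for guest_sec in arrive_time:
--         if cur_sec < guest_sec:                     # 아직 손님 오기 전이면
--             while cur_sec + M <= guest_sec:         # 손님 올 때까지 계속 구워
--                 cur_sec += M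
--                 cur_num += K
--         if guest_sec - M < 0 or cur_num == 0:       # 너무 일찍 오거나 왔는데 붕어빵이 없으면
--             return 'Impossible'                     # 못 줘
--         cur_num -= 1                                # 손님 한명 왔으니 붕어빵 하나 줘
--     return 'Possible'                               # 다 줬으면 성공
-- ===== SOURCE B (Python) =====
-- def boongeobbang(N, M, K, arrive_time):
--     arrive_time.sort()
--     for served, t in enumerate(arrive_time):
--         if t < M or (t // M) * K <= served:
--             return 'Impossible'
--     return 'Possible'
-- ===== Notes on version B (the rewrite author's own statement) =====
-- stated objective: simpler
-- what changed: Replaces A's per-batch while-loop clock simulation with a closed-form batch count t//M per guest, compared against the number of guests already served; Pre_ excludes inputs where A's bake loop never terminates (M <= 0 with an arrival after time M) and M = 0 with a nonempty all-nonnegative arrival list, where B's t//M raises ZeroDivisionError.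
-- intended difference: On K < 0 with a nonempty arrival list whose every arrival is at or after time M, A returns 'Possible' because its stock counter starts negative and can never equal 0, while B returns 'Impossible'; B's value is intended since a non-positive batch size bakes no bread to serve. — e.g. on boongeobbang(1, 2, -1, [2]): A returns "Possible", B returns "Impossible"
-- outside the precondition, e.g. on boongeobbang(1, -2, 1, [-5, 3]): A returns 'Impossible', B returns 'Impossible'; on boongeobbang(1, 0, 1, [0]): A returns 'Possible', B raises ZeroDivisionError
import Mathlib
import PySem

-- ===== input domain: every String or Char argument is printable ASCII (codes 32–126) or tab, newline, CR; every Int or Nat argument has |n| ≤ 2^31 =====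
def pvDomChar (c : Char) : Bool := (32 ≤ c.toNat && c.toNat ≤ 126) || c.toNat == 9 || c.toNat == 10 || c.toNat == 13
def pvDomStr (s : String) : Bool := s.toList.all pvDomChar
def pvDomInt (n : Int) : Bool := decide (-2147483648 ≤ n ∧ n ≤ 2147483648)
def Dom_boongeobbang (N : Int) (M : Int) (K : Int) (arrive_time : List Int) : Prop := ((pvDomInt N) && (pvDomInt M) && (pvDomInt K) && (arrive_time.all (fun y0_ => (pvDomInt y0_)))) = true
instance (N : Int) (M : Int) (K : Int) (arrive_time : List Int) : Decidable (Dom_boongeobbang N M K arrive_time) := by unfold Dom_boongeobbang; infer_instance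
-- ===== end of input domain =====

-- B replaces A's per-batch while-loop clock simulation by a closed-form batch count
-- t // M per guest, compared against the number of guests already served.
-- Both A and B sort arrive_time in place; the equivalence proved is about the return value.


-- ===== PORT A =====
-- the inner 'while cur_sec + M <= guest_sec' loop; the fuel supplied is sufficient whenever M ≥ 1
def pvBakeA (M K guest : Int) : Nat → Int → Int → Int × Int
  | 0, cur_sec, cur_num => (cur_sec, cur_num)
  | fuel + 1, cur_sec, cur_num =>
      if cur_sec + M ≤ guest then pvBakeA M K guest fuel (cur_sec + M) (cur_num + K)
      else (cur_sec, cur_num)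

def pvLoopA (M K : Int) : List Int → Int → Int → String
  | [], _, _ => "Possible"
  | g :: rest, cur_sec, cur_num =>
      let p := if cur_sec < g then pvBakeA M K g ((g - cur_sec).toNat + 1) cur_sec cur_num
               else (cur_sec, cur_num)
      if g - M < 0 ∨ p.2 = 0 then "Impossible"
      else pvLoopA M K rest p.1 (p.2 - 1)

def boongeobbang (N : Int) (M : Int) (K : Int) (arrive_time : List Int) : String :=
  pvLoopA M K (PySem.List.sorted arrive_time (fun x => x) false) M K

-- ===== PORT B =====
-- served is the enumerate index
def pvLoopB (M K : Int) : List Int → Int → String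
  | [], _ => "Possible"
  | t :: rest, served =>
      if t < M then "Impossible"
      else if PySem.Int.floordiv t M * K ≤ served then "Impossible"
      else pvLoopB M K rest (served + 1)

def boongeobbang_alt (N : Int) (M : Int) (K : Int) (arrive_time : List Int) : String :=
  pvLoopB M K (PySem.List.sorted arrive_time (fun x => x) false) 0

-- ===== PRECONDITION & SPEC =====
-- Pre_ excludes (a) the inputs on which A's bake loop never terminates (M ≤ 0 together with
-- some arrival strictly after time M), and (b) M = 0 with a nonempty arrival list whose
-- arrivals are all ≥ 0, where B's 't // M' raises ZeroDivisionError while A returns.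
def Pre_boongeobbang (N : Int) (M : Int) (K : Int) (arrive_time : List Int) : Prop :=
  (1 ≤ M ∨ ∀ t ∈ arrive_time, t ≤ M) ∧
  ¬(M = 0 ∧ arrive_time ≠ [] ∧ ∀ t ∈ arrive_time, 0 ≤ t)
instance (N : Int) (M : Int) (K : Int) (arrive_time : List Int) : Decidable (Pre_boongeobbang N M K arrive_time) := by unfold Pre_boongeobbang; infer_instance

def pvWitness_boongeobbang : Int × Int × Int × List Int := (3, 2, 1, [2, 4, 6])

-- On K < 0 with a nonempty arrival list whose every arrival is at or after time M, A returns
-- 'Possible' (its stock counter starts negative and can never equal 0) while B returns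
-- 'Impossible'; B's value is intended: a non-positive batch size bakes no bread to serve.
def D_boongeobbang (N : Int) (M : Int) (K : Int) (arrive_time : List Int) : Prop :=
  K < 0 ∧ arrive_time ≠ [] ∧ ∀ t ∈ arrive_time, M ≤ t
instance (N : Int) (M : Int) (K : Int) (arrive_time : List Int) : Decidable (D_boongeobbang N M K arrive_time) := by unfold D_boongeobbang; infer_instance

def Spec_boongeobbang (N : Int) (M : Int) (K : Int) (arrive_time : List Int) (out : String) : Prop := ¬ D_boongeobbang N M K arrive_time → out = boongeobbang_alt N M K arrive_time
instance (N : Int) (M : Int) (K : Int) (arrive_time : List Int) (out : String) : Decidable (Spec_boongeobbang N M K arrive_time out) := by unfold Spec_boongeobbang; infer_instance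

def pvDiffWitness_boongeobbang : Int × Int × Int × List Int := (1, 2, -1, [2])
def pvDiffWitnessOut_boongeobbang : String × String := ("Possible", "Impossible")

-- ===== CLAIM (what is proved, stated in full; the proofs are below) =====
def Claim_unchanged_boongeobbang : Prop := ∀ (N : Int) (M : Int) (K : Int) (arrive_time : List Int), Dom_boongeobbang N M K arrive_time → Pre_boongeobbang N M K arrive_time → Spec_boongeobbang N M K arrive_time (boongeobbang N M K arrive_time)
def Claim_changed_boongeobbang : Prop := Dom_boongeobbang (pvDiffWitness_boongeobbang.1) (pvDiffWitness_boongeobbang.2.1) (pvDiffWitness_boongeobbang.2.2.1) (pvDiffWitness_boongeobbang.2.2.2) ∧ Pre_boongeobbang (pvDiffWitness_boongeobbang.1) (pvDiffWitness_boongeobbang.2.1) (pvDiffWitness_boongeobbang.2.2.1) (pvDiffWitness_boongeobbang.2.2.2) ∧ D_boongeobbang (pvDiffWitness_boongeobbang.1) (pvDiffWitness_boongeobbang.2.1) (pvDiffWitness_boongeobbang.2.2.1) (pvDiffWitness_boongeobbang.2.2.2) ∧ boongeobbang (pvDiffWitness_boongeobbang.1) (pvDiffWitness_boongeobbang.2.1)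 (pvDiffWitness_boongeobbang.2.2.1) (pvDiffWitness_boongeobbang.2.2.2) = pvDiffWitnessOut_boongeobbang.1 ∧ boongeobbang_alt (pvDiffWitness_boongeobbang.1) (pvDiffWitness_boongeobbang.2.1) (pvDiffWitness_boongeobbang.2.2.1) (pvDiffWitness_boongeobbang.2.2.2) = pvDiffWitnessOut_boongeobbang.2 ∧ pvDiffWitnessOut_boongeobbang.1 ≠ pvDiffWitnessOut_boongeobbang.2
def Claim_exact_boongeobbang : Prop := ∀ (N : Int) (M : Int) (K : Int) (arrive_time : List Int), Dom_boongeobbang N M K arrive_time → Pre_boongeobbang N M K arrive_time → D_boongeobbang N M K arrive_time → boongeobbang N M K arrive_time ≠ boongeobbang_alt N M K arrive_time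

-- ===== LEMMAS AND PROOFS =====

-- characterisation of the bake loop for M ≥ 1: starting at cur_sec = M*b it raises the
-- batch count to max b (g // M), given enough fuel
theorem pvBakeA_spec (M K g : Int) (hM : 1 ≤ M) :
    ∀ (fuel : Nat) (b n : Int), g / M - b < (fuel : Int) →
      pvBakeA M K g fuel (M * b) n = (M * max b (g / M), n + K * (max b (g / M) - b)) := by
  intro fuel
  induction fuel with
  | zero =>
      intro b n h
      have : g / M ≤ b := by omega
      simp [pvBakeA, max_eq_left this]
  | succ f ih =>
      intro b n h
      by_cases hc : M * b + M ≤ g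
      · have hble : b + 1 ≤ g / M := by
          rw [Int.le_ediv_iff_mul_le (by omega)]
          nlinarith
        have e : M * b + M = M * (b + 1) := by ring
        rw [pvBakeA, if_pos hc, e, ih (b + 1) (n + K) (by omega)]
        have h1 : max (b + 1) (g / M) = max b (g / M) := by omega
        rw [h1]
        congr 1
        ring
      · have hlt : g < M * (b + 1) := by nlinarith [hc]
        have : g / M < b + 1 := by
          rw [Int.ediv_lt_iff_lt_mul (by omega)]; nlinarith
        have hmax : max b (g / M) = b := by omega
        simp [pvBakeA, hc, hmax]

-- main loop equivalence, M ≥ 1 and K ≥ 0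
theorem pvLoop_eq_pos (M K : Int) (hM : 1 ≤ M) (hK : 0 ≤ K) :
    ∀ (l : List Int) (b i : Int), l.Pairwise (· ≤ ·) →
      1 ≤ b → (∀ t ∈ l, b ≤ max 1 (t / M)) → 0 ≤ i → 0 ≤ K * b - i →
      pvLoopA M K l (M * b) (K * b - i) = pvLoopB M K l i := by
  intro l
  induction l with
  | nil => intro b i _ _ _ _ _; rfl
  | cons t rest ih =>
      intro b i hpw hb hle hi hnn
      have hpw' : rest.Pairwise (· ≤ ·) := hpw.tail
      have hhead : ∀ u ∈ rest, t ≤ u := fun u hu => (List.pairwise_cons.mp hpw).1 u hu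
      have hbt : b ≤ max 1 (t / M) := hle t (by simp)
      by_cases htM : t < M
      · -- both Impossible at this guest
        have hnolo : ¬ M * b < t → True := fun _ => trivial
        simp only [pvLoopA, pvLoopB]
        rw [if_pos (Or.inl (by omega : t - M < 0)), if_pos htM]
      · -- t ≥ M, so t / M ≥ 1 and the baked batch count is exactly t / M
        have hdiv1 : 1 ≤ t / M := by
          rw [Int.le_ediv_iff_mul_le (by omega)]; omega
        have hbt' : b ≤ t / M := by omega
        have hstate :
            (if M * b < t then pvBakeA M K t ((t - M * b).toNat + 1) (M * b) (K * b - i)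
             else (M * b, K * b - i))
            = (M * (t / M), K * (t / M) - i) := by
          by_cases hlt : M * b < t
          · have hfuel : t / M - b < ((t - M * b).toNat + 1 : Int) := by
              have e1 : M * (t / M) + t % M = t := Int.ediv_add_emod t M
              have e2 : 0 ≤ t % M := Int.emod_nonneg t (by omega)
              have e5 : ((t - M * b).toNat : Int) = t - M * b := Int.toNat_of_nonneg (by omega)
              by_cases h3 : t / M - b ≤ 0
              · omega
              · have h6 : t / M - b ≤ M * (t / M - b) := le_mul_of_one_le_left (by omega) hM
                have h7 : M * (t / M - b) = M * (t / M) - M * b := by ring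
                omega
            rw [if_pos hlt, pvBakeA_spec M K t hM _ b _ hfuel]
            have hmax : max b (t / M) = t / M := by omega
            rw [hmax]
            congr 1
            ring
          · have hge : t ≤ M * b := by omega
            have hdb : t / M ≤ b := by
              have h1 := Int.ediv_le_ediv (by omega : (0:Int) < M) hge
              rwa [Int.mul_ediv_cancel_left _ (by omega : M ≠ 0)] at h1
            have hbeq : t / M = b := by omega
            rw [if_neg hlt, hbeq]
        have hfd : PySem.Int.floordiv t M = t / M :=
          PySem.Int.floordiv_eq_ediv_of_pos (by omega)
        have hmono : K * b ≤ K * (t / M) := by nlinarith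
        have hcond : (K * (t / M) - i = 0) ↔ (PySem.Int.floordiv t M * K ≤ i) := by
          rw [hfd, mul_comm (t / M) K]
          omega
        by_cases himp : K * (t / M) - i = 0
        · simp only [pvLoopA, pvLoopB, hstate]
          rw [if_pos (Or.inr himp), if_neg htM, if_pos (hcond.mp himp)]
        · simp only [pvLoopA, pvLoopB, hstate]
          rw [if_neg (by push Not; exact ⟨by omega, himp⟩), if_neg htM,
              if_neg (fun h => himp (hcond.mpr h))]
          have hrec : K * (t / M) - i - 1 = K * (t / M) - (i + 1) := by ring
          rw [hrec]
          apply ih (t / M) (i + 1) hpw' (by omega)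
          · intro u hu
            have htu : t ≤ u := hhead u hu
            have hmono' : t / M ≤ u / M := Int.ediv_le_ediv (by omega) htu
            omega
          · omega
          · have h1 : 0 ≤ K * (t / M) - i := by linarith
            have h2 : 0 < K * (t / M) - i := h1.lt_of_ne (Ne.symm himp)
            linarith

-- main loop equivalence, M < 0, K ≥ 0, every arrival exactly at M (no baking ever happens)
theorem pvLoop_eq_allM (M K : Int) (hM : M < 0) (hK : 0 ≤ K) :
    ∀ (l : List Int) (i : Int), (∀ t ∈ l, t = M) → 0 ≤ i → 0 ≤ K - i →
      pvLoopA M K l M (K - i) = pvLoopB M K l i := by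
  have hfd : PySem.Int.floordiv M M = 1 := by
    rw [← PySem.Int.floordiv_neg_neg M M, PySem.Int.floordiv_eq_ediv_of_pos (by omega),
        Int.ediv_self (by omega)]
  intro l
  induction l with
  | nil => intro i _ _ _; rfl
  | cons t rest ih =>
      intro i hall hi hnn
      have ht : t = M := hall t (by simp)
      subst ht
      have hstate : (if t < t then pvBakeA K K t ((t - t).toNat + 1) t (K - i)
                     else (t, K - i)) = (t, K - i) := if_neg (by omega)
      by_cases himp : K - i = 0
      · simp only [pvLoopA, pvLoopB]
        rw [if_neg (by omega : ¬ t < t)]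
        rw [if_pos (Or.inr himp), if_neg (by omega : ¬ t < t), hfd, if_pos (by omega)]
      · simp only [pvLoopA, pvLoopB]
        rw [if_neg (by omega : ¬ t < t)]
        rw [if_neg (by push Not; exact ⟨by omega, himp⟩), if_neg (by omega : ¬ t < t), hfd,
            if_neg (by omega)]
        have hrec : K - i - 1 = K - (i + 1) := by ring
        rw [hrec]
        exact ih (i + 1) (fun u hu => hall u (by simp [hu])) (by omega) (by omega)

-- with K < 0, baking only ever decreases the stock: it stays negative
theorem pvBakeA_neg (M K g : Int) (hK : K < 0) :
    ∀ (fuel : Nat) (cur n : Int), n < 0 → (pvBakeA M K g fuel cur n).2 < 0 := by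
  intro fuel
  induction fuel with
  | zero => intro cur n h; simpa [pvBakeA] using h
  | succ f ih =>
      intro cur n h
      by_cases hc : cur + M ≤ g
      · rw [pvBakeA, if_pos hc]; exact ih _ _ (by omega)
      · simpa [pvBakeA, hc] using h

-- with K < 0 and every guest arriving at or after M, A serves everyone
theorem pvLoopA_neg (M K : Int) (hK : K < 0) :
    ∀ (l : List Int) (cur n : Int), (∀ t ∈ l, M ≤ t) → n < 0 →
      pvLoopA M K l cur n = "Possible" := by
  intro l
  induction l with
  | nil => intro cur n _ _; rfl
  | cons t rest ih =>
      intro cur n hall hn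
      have ht : M ≤ t := hall t (by simp)
      have hp : (if cur < t then pvBakeA M K t ((t - cur).toNat + 1) cur n
                 else (cur, n)).2 < 0 := by
        by_cases hc : cur < t
        · rw [if_pos hc]; exact pvBakeA_neg M K t hK _ cur n hn
        · simpa [hc] using hn
      simp only [pvLoopA]
      rw [if_neg (by push Not; exact ⟨by omega, by omega⟩)]
      exact ih _ _ (fun u hu => hall u (by simp [hu])) (by omega)

-- ===== VERDICT (by name; the statements are the Claim_ definitions above) =====
theorem boongeobbang_spec : Claim_unchanged_boongeobbang := by
  intro N M K at_ hdom hpre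
  unfold Spec_boongeobbang
  intro hnD
  unfold boongeobbang boongeobbang_alt
  have hpw : (PySem.List.sorted at_ (fun x => x) false).Pairwise (· ≤ ·) :=
    PySem.List.sorted_pairwise at_ (fun x => x)
  have hmem : ∀ t, t ∈ PySem.List.sorted at_ (fun x => x) false ↔ t ∈ at_ :=
    fun t => PySem.List.mem_sorted at_ (fun x => x) false t
  by_cases hK : 0 ≤ K
  · by_cases hM : 1 ≤ M
    · have h0 := pvLoop_eq_pos M K hM hK (PySem.List.sorted at_ (fun x => x) false) 1 0 hpw
        (le_refl 1) (fun t _ => le_max_left 1 (t / M)) (le_refl 0) (by omega)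
      simpa using h0
    · have hall : ∀ t ∈ at_, t ≤ M := hpre.1.resolve_left hM
      rcases hs : PySem.List.sorted at_ (fun x => x) false with _ | ⟨h0, rest⟩
      · rfl
      · have hh0 : h0 ∈ at_ := (hmem h0).mp (by rw [hs]; simp)
        have hmin : ∀ y ∈ at_, h0 ≤ y := PySem.List.key_head_sorted_le at_ (fun x => x) hs
        by_cases hlt : h0 < M
        · have hstate : (if M < h0 then pvBakeA M K h0 ((h0 - M).toNat + 1) M K
                         else (M, K)) = (M, K) := if_neg (by omega)
          simp only [pvLoopA, pvLoopB, hstate]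
          rw [if_pos (Or.inl (by omega : h0 - M < 0)), if_pos hlt]
        · have h0M : h0 = M := le_antisymm (hall h0 hh0) (by omega)
          have hM0 : M ≠ 0 := by
            intro hz
            apply hpre.2
            refine ⟨hz, ?_, ?_⟩
            · intro hnil
              rw [hnil] at hh0
              simp at hh0
            · intro t ht
              have := hmin t ht
              omega
          have hMneg : M < 0 := lt_of_le_of_ne (by omega) hM0
          have hallM : ∀ t ∈ h0 :: rest, t = M := by
            intro t ht
            have ht' : t ∈ at_ := (hmem t).mp (by rw [hs]; exact ht)
            have h1 : t ≤ M := hall t ht'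
            have h2 : h0 ≤ t := hmin t ht'
            omega
          have h0' := pvLoop_eq_allM M K hMneg hK (h0 :: rest) 0 hallM (le_refl 0) (by omega)
          simpa using h0'
  · -- K < 0: ¬D forces some arrival strictly before M (or no arrivals)
    by_cases hnil : at_ = []
    · rw [hnil]
      rfl
    · have hex : ∃ t ∈ at_, t < M := by
        by_contra hc
        push Not at hc
        exact hnD ⟨by omega, hnil, hc⟩
      obtain ⟨t0, ht0, ht0M⟩ := hex
      rcases hs : PySem.List.sorted at_ (fun x => x) false with _ | ⟨h0, rest⟩
      · exact absurd ((PySem.List.sorted_eq_nil_iff at_ (fun x => x) false).mp hs) hnil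
      · have hh0lt : h0 < M := by
          have h2 : h0 ≤ t0 := PySem.List.key_head_sorted_le at_ (fun x => x) hs t0 ht0
          omega
        have hstate : (if M < h0 then pvBakeA M K h0 ((h0 - M).toNat + 1) M K
                       else (M, K)) = (M, K) := if_neg (by omega)
        simp only [pvLoopA, pvLoopB, hstate]
        rw [if_pos (Or.inl (by omega : h0 - M < 0)), if_pos hh0lt]

theorem boongeobbang_changed : Claim_changed_boongeobbang := by
  unfold Claim_changed_boongeobbang; decide

theorem boongeobbang_tight : Claim_exact_boongeobbang := by
  intro N M K at_ hdom hpre hD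
  obtain ⟨hK, hne, hge⟩ := hD
  unfold boongeobbang boongeobbang_alt
  have hmem : ∀ t, t ∈ PySem.List.sorted at_ (fun x => x) false ↔ t ∈ at_ :=
    fun t => PySem.List.mem_sorted at_ (fun x => x) false t
  have hA : pvLoopA M K (PySem.List.sorted at_ (fun x => x) false) M K = "Possible" :=
    pvLoopA_neg M K hK _ M K (fun t ht => hge t ((hmem t).mp ht)) hK
  rcases hs : PySem.List.sorted at_ (fun x => x) false with _ | ⟨h0, rest⟩
  · exact absurd ((PySem.List.sorted_eq_nil_iff at_ (fun x => x) false).mp hs) hne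
  · have hh0 : h0 ∈ at_ := (hmem h0).mp (by rw [hs]; simp)
    have hMh0 : M ≤ h0 := hge h0 hh0
    have hfd1 : 1 ≤ PySem.Int.floordiv h0 M := by
      by_cases hM : 1 ≤ M
      · rw [PySem.Int.floordiv_eq_ediv_of_pos (by omega), Int.le_ediv_iff_mul_le (by omega)]
        omega
      · have hall : ∀ t ∈ at_, t ≤ M := hpre.1.resolve_left hM
        have hM0 : M ≠ 0 := by
          intro hz
          exact hpre.2 ⟨hz, hne, fun t ht => by have := hge t ht; omega⟩
        have h0M : h0 = M := le_antisymm (hall h0 hh0) hMh0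
        rw [h0M, ← PySem.Int.floordiv_neg_neg M M,
            PySem.Int.floordiv_eq_ediv_of_pos (by omega), Int.ediv_self (by omega)]
    have hB : pvLoopB M K (h0 :: rest) 0 = "Impossible" := by
      simp only [pvLoopB]
      rw [if_neg (by omega : ¬ h0 < M), if_pos (by nlinarith)]
    rw [hs] at hA
    rw [hA, hB]
    decide
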